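-- pv_equiv track=rewrite | github.com/NicolasVidalDuque/EstructuraDatos | tarea1.py | diferenciaListas
-- ===== SOURCE A (Python) =====
-- def diferenciaListas(a, b):
--     hTable = {}
--     result = []
--     for i in b:
--         hTable[i] = False
--     for i in a:
--         if (i not in hTable):
--             result.append(i)
--         else:
--             if (hTable[i]):
--                 result.append(i)
--             hTable[i] = True
--     return result
-- ===== SOURCE B (Python) =====
-- def diferenciaListas(a, b):
--     result = list(a)
--     for v in set(b):
--         if v in result:
--             result.remove(v)
--     return result
-- ===== Notes on version B (the rewrite author's own statement) =====
-- stated objective: simpler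
-- what changed: B copies a and deletes one first occurrence of each distinct value of b with list.remove, instead of A's hash-table of seen-flags driving a single marked pass over a.
import Mathlib
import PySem

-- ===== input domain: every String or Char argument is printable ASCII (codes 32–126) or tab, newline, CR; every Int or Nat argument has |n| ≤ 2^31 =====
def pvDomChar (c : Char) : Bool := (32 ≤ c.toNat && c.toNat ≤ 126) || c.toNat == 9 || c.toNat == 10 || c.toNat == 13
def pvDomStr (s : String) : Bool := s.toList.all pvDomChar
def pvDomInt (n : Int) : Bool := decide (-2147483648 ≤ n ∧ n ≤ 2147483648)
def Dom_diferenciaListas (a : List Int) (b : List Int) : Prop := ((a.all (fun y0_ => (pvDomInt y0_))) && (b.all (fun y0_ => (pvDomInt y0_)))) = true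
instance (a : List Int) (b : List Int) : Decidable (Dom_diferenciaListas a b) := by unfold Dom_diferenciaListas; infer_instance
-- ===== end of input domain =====

-- B removes one first occurrence of each distinct value of b from a copy of a,
-- instead of A's hash-table-marked single pass over a; objective: simpler.

-- ===== PORT A =====
def diferenciaListas (a : List Int) (b : List Int) : List Int :=
  let hTable : PySem.Dict Int Bool := b.foldl (fun h i => h.insert i false) PySem.Dict.empty
  (a.foldl (fun (st : PySem.Dict Int Bool × List Int) i =>
      match st.1.get? i with
      | none => (st.1, st.2 ++ [i])
      | some v => (st.1.insert i true, if v then st.2 ++ [i] else st.2))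
    (hTable, [])).2

-- ===== PORT B =====
def diferenciaListas_alt (a : List Int) (b : List Int) : List Int :=
  (PySem.Set.ofList b).foldl
    (fun result v =>
      if result.contains v then (PySem.List.remove? result v).getD result else result)
    a

-- ===== PRECONDITION & SPEC =====
def Spec_diferenciaListas (a : List Int) (b : List Int) (out : List Int) : Prop := out = diferenciaListas_alt a b
instance (a : List Int) (b : List Int) (out : List Int) : Decidable (Spec_diferenciaListas a b out) := by unfold Spec_diferenciaListas; infer_instance

-- ===== CLAIM (what is proved, stated in full; the proofs are below) =====
def Claim_equal_diferenciaListas : Prop := ∀ (a : List Int) (b : List Int), Dom_diferenciaListas a b → Spec_diferenciaListas a b (diferenciaListas a b)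

-- ===== LEMMAS AND PROOFS =====

-- abstract form of A's marking pass: P x = "x is a key still marked False (pending)"
def pvLoop2 (P : Int → Bool) : List Int → List Int
  | [] => []
  | i :: t => if P i then pvLoop2 (fun x => if x = i then false else P x) t else i :: pvLoop2 P t

def pvStepA (st : PySem.Dict Int Bool × List Int) (i : Int) : PySem.Dict Int Bool × List Int :=
  match st.1.get? i with
  | none => (st.1, st.2 ++ [i])
  | some v => (st.1.insert i true, if v then st.2 ++ [i] else st.2)

def pvStepB (result : List Int) (v : Int) : List Int :=
  if result.contains v then (PySem.List.remove? result v).getD result else result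

def pvPend (h : PySem.Dict Int Bool) (x : Int) : Bool :=
  match h.get? x with
  | some false => true
  | _ => false

theorem pv_get?_insert (d : PySem.Dict Int Bool) (k x : Int) (v : Bool) :
    (d.insert k v).get? x = if k = x then some v else d.get? x := by
  by_cases h : k = x
  · subst h; simp [pysem]
  · simp [pysem, h]
    intro hx; exact absurd hx.symm h

theorem pv_pend_insert_true (h : PySem.Dict Int Bool) (i : Int) :
    pvPend (h.insert i true) = fun x => if x = i then false else pvPend h x := by
  funext x
  by_cases hx : x = i
  · subst hx; simp [pvPend]
  · have hg : (h.insert i true).get? x = h.get? x := by rw [pv_get?_insert, if_neg (Ne.symm hx)]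
    simp only [pvPend, hg, if_neg hx]

theorem pv_foldA (a : List Int) : ∀ (h : PySem.Dict Int Bool) (r : List Int),
    (a.foldl pvStepA (h, r)).2 = r ++ pvLoop2 (pvPend h) a := by
  induction a with
  | nil => intro h r; simp [pvLoop2]
  | cons i t ih =>
    intro h r
    rw [List.foldl_cons]
    rcases hv : h.get? i with _ | v
    · have hstep : pvStepA (h, r) i = (h, r ++ [i]) := by simp [pvStepA, hv]
      have hp : pvPend h i = false := by simp [pvPend, hv]
      rw [hstep, ih, pvLoop2, if_neg (by simp [hp]), List.append_assoc, List.cons_append,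
        List.nil_append]
    · cases v
      · have hstep : pvStepA (h, r) i = (h.insert i true, r) := by simp [pvStepA, hv]
        have hp : pvPend h i = true := by simp [pvPend, hv]
        rw [hstep, ih, pvLoop2, if_pos hp, pv_pend_insert_true]
      · have hstep : pvStepA (h, r) i = (h.insert i true, r ++ [i]) := by simp [pvStepA, hv]
        have hp : pvPend h i = false := by simp [pvPend, hv]
        have hsame : pvPend (h.insert i true) = pvPend h := by
          rw [pv_pend_insert_true]; funext x
          by_cases hx : x = i
          · subst hx; simp [pvPend, hv]
          · simp [hx]
        rw [hstep, ih, hsame, pvLoop2, if_neg (by simp [hp]), List.append_assoc,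
          List.cons_append, List.nil_append]

theorem pv_get?_build (b : List Int) : ∀ (d : PySem.Dict Int Bool) (x : Int),
    (b.foldl (fun h i => h.insert i false) d).get? x
      = if x ∈ b then some false else d.get? x := by
  induction b with
  | nil => intro d x; simp
  | cons i t ih =>
    intro d x
    rw [List.foldl_cons, ih]
    by_cases hx : x ∈ t
    · simp [hx]
    · by_cases hxi : x = i
      · subst hxi; simp [hx]
      · simp [hx, hxi, pv_get?_insert, Ne.symm hxi]

-- B-side: a head that no pending value removes passes through the whole fold
theorem pv_stepB_cons (i v : Int) (t : List Int) (hvi : v ≠ i) :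
    pvStepB (i :: t) v = i :: pvStepB t v := by
  unfold pvStepB
  by_cases hvt : v ∈ t
  · rw [PySem.List.remove?_cons_of_ne t (Ne.symm hvi), PySem.List.remove?_eq_some_erase t v hvt]
    simp [hvt]
  · simp [hvt]
    exact fun hh => absurd hh hvi

theorem pv_foldB_not_mem (i : Int) (t : List Int) :
    ∀ (vs : List Int), i ∉ vs → vs.foldl pvStepB (i :: t) = i :: vs.foldl pvStepB t := by
  intro vs
  induction vs generalizing t with
  | nil => intro _; rfl
  | cons v ws ih =>
    intro hni
    have hvi : v ≠ i := fun hh => hni (hh ▸ List.mem_cons_self)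
    rw [List.foldl_cons, List.foldl_cons, pv_stepB_cons i v t hvi,
      ih _ (fun hh => hni (List.mem_cons_of_mem _ hh))]

theorem pv_foldB_mem (i : Int) (t : List Int) :
    ∀ (vs : List Int), vs.Nodup → i ∈ vs →
      vs.foldl pvStepB (i :: t) = (vs.erase i).foldl pvStepB t := by
  intro vs
  induction vs generalizing t with
  | nil => intro _ h; cases h
  | cons v ws ih =>
    intro hnd hmem
    by_cases hvi : v = i
    · subst hvi
      have hstep : pvStepB (v :: t) v = t := by unfold pvStepB; simp
      rw [List.foldl_cons, hstep, List.erase_cons_head]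
    · have hiw : i ∈ ws := by
        rcases List.mem_cons.mp hmem with hh | hh
        · exact absurd hh.symm hvi
        · exact hh
      rw [List.foldl_cons, pv_stepB_cons i v t hvi,
        ih _ (List.Nodup.of_cons hnd) hiw, List.erase_cons_tail (by simpa using hvi),
        List.foldl_cons]

theorem pv_loop2_eq_foldB (a : List Int) : ∀ (vs : List Int), vs.Nodup →
    pvLoop2 (fun x => decide (x ∈ vs)) a = vs.foldl pvStepB a := by
  induction a with
  | nil =>
    intro vs _
    have hnil : ∀ ws : List Int, ws.foldl pvStepB [] = [] := by
      intro ws; induction ws with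
      | nil => rfl
      | cons w t ih => rw [List.foldl_cons]; simpa [pvStepB] using ih
    simp [pvLoop2, hnil vs]
  | cons i t ih =>
    intro vs hnd
    unfold pvLoop2
    by_cases hm : i ∈ vs
    · rw [if_pos (by simpa using hm), pv_foldB_mem i t vs hnd hm]
      have heq : (fun x => if x = i then false else decide (x ∈ vs))
          = (fun x => decide (x ∈ vs.erase i)) := by
        funext x
        by_cases hx : x = i
        · subst hx
          simp [List.Nodup.mem_erase_iff hnd]
        · simp [hx, List.Nodup.mem_erase_iff hnd]
      rw [heq, ih _ (List.Nodup.erase i hnd)]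
    · rw [if_neg (by simpa using hm), pv_foldB_not_mem i t vs hm, ih _ hnd]

-- ===== VERDICT (by name: the statement is the Claim_ definition above) =====
theorem diferenciaListas_spec : Claim_equal_diferenciaListas := by
  intro a b _
  show diferenciaListas a b = diferenciaListas_alt a b
  unfold diferenciaListas diferenciaListas_alt
  show (a.foldl pvStepA (b.foldl (fun h i => h.insert i false) PySem.Dict.empty, [])).2
    = (PySem.Set.ofList b).foldl pvStepB a
  rw [pv_foldA a _ [], List.nil_append]
  have hpend : pvPend (b.foldl (fun h i => h.insert i false) PySem.Dict.empty)
      = fun x => decide (x ∈ PySem.Set.ofList b) := by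
    funext x
    rw [pvPend]
    rw [pv_get?_build]
    by_cases hx : x ∈ b
    · simp [hx, PySem.Set.mem_ofList]
    · simp [hx, PySem.Set.mem_ofList, PySem.Dict.empty, PySem.Dict.get?]
  rw [hpend, pv_loop2_eq_foldB a _ (PySem.Set.nodup_ofList b)]
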